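-- pv_equiv track=rewrite | github.com/Shree-Spirit/opensre | app/agents/tail.py | _parse_lsof_fd1
-- ===== SOURCE A (Python) =====
-- def _parse_lsof_fd1(stdout: str) -> tuple[str | None, str | None]:
--     """Return ``(type, name)`` for the ``f1`` block in ``lsof -F ftn`` output.
--
--     Each fd block starts with ``f<num>`` and is followed by zero or more
--     field lines of the form ``<letter><value>`` (here: ``t`` for fd type,
--     ``n`` for fd name). A new ``f`` line ends the previous block. Fields
--     we don't care about are silently skipped.
--     """
--     fd: str | None = None
--     fd_type: str | None = None
--     fd_name: str | None = None
--     captured = False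
--
--     for line in stdout.splitlines():
--         if not line:
--             continue
--         prefix, value = line[0], line[1:]
--         if prefix == "f":
--             if fd == "1":
--                 captured = True
--                 break
--             fd = value
--             fd_type = None
--             fd_name = None
--         elif fd == "1":
--             if prefix == "t":
--                 fd_type = value
--             elif prefix == "n":
--                 fd_name = value
--
--     if fd == "1" and not captured:
--         captured = True
--
--     if not captured:
--         return None, None
--     return fd_type, fd_name
-- ===== SOURCE B (Python) =====
-- def _parse_lsof_fd1(stdout: str) -> tuple:
--     """Locate the ``f1`` block, then parse only that block."""
--     lines = [l for l in stdout.splitlines() if l]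
--     for i, l in enumerate(lines):
--         if l == "f1":
--             fd_type = None
--             fd_name = None
--             for m in lines[i + 1:]:
--                 if m.startswith("f"):
--                     break
--                 if m.startswith("t"):
--                     fd_type = m[1:]
--                 elif m.startswith("n"):
--                     fd_name = m[1:]
--             return fd_type, fd_name
--     return None, None
-- ===== Notes on version B (the rewrite author's own statement) =====
-- stated objective: simpler
-- what changed: Replaces A's single accumulating state machine (current-fd register, reset-on-new-block, captured flag) with a two-phase locate-then-parse: find the first line equal to 'f1', then scan only the following lines of that block.
import Mathlib
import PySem

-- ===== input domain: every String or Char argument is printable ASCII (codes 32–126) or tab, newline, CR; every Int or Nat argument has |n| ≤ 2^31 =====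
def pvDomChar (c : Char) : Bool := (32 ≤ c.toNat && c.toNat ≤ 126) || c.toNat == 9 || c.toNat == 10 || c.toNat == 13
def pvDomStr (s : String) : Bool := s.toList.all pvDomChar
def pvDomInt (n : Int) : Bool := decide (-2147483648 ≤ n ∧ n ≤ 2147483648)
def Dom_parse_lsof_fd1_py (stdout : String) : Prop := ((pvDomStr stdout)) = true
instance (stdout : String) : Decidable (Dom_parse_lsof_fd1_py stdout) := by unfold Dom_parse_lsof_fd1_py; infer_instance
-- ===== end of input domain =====

-- B replaces A's one-pass state machine with a locate-the-"f1"-line then parse-that-block two-phase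
-- structure (objective: simpler); the return values are proved equal on every input.

-- ===== PORT A =====
-- A's loop over splitlines with state (fd, fd_type, fd_name); 'break' is the early return and the
-- post-loop 'captured' check is the [] case. 'if not line: continue' is the toList = [] case;
-- line[0]/line[1:] are the head/tail of the line's characters (exact: the line is non-empty there).
def pvLoopA : List String → Option String → Option String → Option String → Option String × Option String
  | [], fd, ft, fn => if fd = some "1" then (ft, fn) else (none, none)
  | l :: rest, fd, ft, fn =>
    match l.toList with
    | [] => pvLoopA rest fd ft fn
    | c :: cs =>
      let value := String.ofList cs
      if c = 'f' then
        if fd = some "1" then (ft, fn)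
        else pvLoopA rest (some value) none none
      else if fd = some "1" then
        if c = 't' then pvLoopA rest fd (some value) fn
        else if c = 'n' then pvLoopA rest fd ft (some value)
        else pvLoopA rest fd ft fn
      else pvLoopA rest fd ft fn

def parse_lsof_fd1_py (stdout : String) : Option String × Option String :=
  pvLoopA (PySem.Str.splitlines stdout) none none none

-- ===== PORT B =====
-- inner loop of B: parse field lines of the f1 block until the next 'f' line
def pvScanB : List String → Option String → Option String → Option String × Option String
  | [], ft, fn => (ft, fn)
  | m :: rest, ft, fn =>
    if PySem.Str.startswith m "f" then (ft, fn)
    else if PySem.Str.startswith m "t" then pvScanB rest (some (PySem.Str.slice m (some 1) none)) fn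
    else if PySem.Str.startswith m "n" then pvScanB rest ft (some (PySem.Str.slice m (some 1) none))
    else pvScanB rest ft fn

-- outer loop of B: linear search for the line "f1"
def pvFindB : List String → Option String × Option String
  | [] => (none, none)
  | l :: rest => if l = "f1" then pvScanB rest none none else pvFindB rest

def parse_lsof_fd1_py_alt (stdout : String) : Option String × Option String :=
  pvFindB ((PySem.Str.splitlines stdout).filter (fun l => l ≠ ""))

-- ===== PRECONDITION & SPEC =====
def Spec_parse_lsof_fd1_py (stdout : String) (out : Option String × Option String) : Prop := out = parse_lsof_fd1_py_alt stdout
instance (stdout : String) (out : Option String × Option String) : Decidable (Spec_parse_lsof_fd1_py stdout out) := by unfold Spec_parse_lsof_fd1_py; infer_instance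

-- ===== CLAIM (what is proved, stated in full; the proofs are below) =====
def Claim_equal_parse_lsof_fd1_py : Prop := ∀ (stdout : String), Dom_parse_lsof_fd1_py stdout → Spec_parse_lsof_fd1_py stdout (parse_lsof_fd1_py stdout)

-- ===== LEMMAS AND PROOFS =====

-- s.startswith(p) for a one-character p reads the first character
lemma pv_startswith_char (l : String) (c : Char) (cs : List Char) (p : String) (d : Char)
    (hl : l.toList = c :: cs) (hp : p.toList = [d]) :
    PySem.Str.startswith l p = (c == d) := by
  simp only [PySem.Str.startswith]
  rw [hl, hp]
  simp [PySem.Chars.startswith, List.isPrefixOf, eq_comm]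

-- line[1:] is the tail of the line's characters
lemma pv_slice_tail (l : String) (c : Char) (cs : List Char) (hl : l.toList = c :: cs) :
    PySem.Str.slice l (some 1) none = String.ofList cs := by
  apply String.toList_inj.mp
  simp [hl, PySem.List.slice_from_one]

-- once inside the f1 block, A's field collection equals B's inner scan
lemma loopA_one (ls : List String) : ∀ ft fn,
    pvLoopA ls (some "1") ft fn = pvScanB (ls.filter (fun l => l ≠ "")) ft fn := by
  induction ls with
  | nil => intro ft fn; simp [pvLoopA, pvScanB]
  | cons l rest ih =>
    intro ft fn
    match hl : l.toList with
    | [] =>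
      have hle : l = "" := String.toList_eq_nil_iff.mp hl
      simp [pvLoopA, hle, ih]
    | c :: cs =>
      have hlne : l ≠ "" := by
        intro h; rw [h] at hl; simp [String.toList] at hl
      have hfil : (l :: rest).filter (fun l => l ≠ "") = l :: rest.filter (fun l => l ≠ "") := by
        simp [hlne]
      rw [hfil]
      simp only [pvLoopA, hl, pvScanB]
      rw [pv_startswith_char l c cs "f" 'f' hl (by decide),
          pv_startswith_char l c cs "t" 't' hl (by decide),
          pv_startswith_char l c cs "n" 'n' hl (by decide),
          pv_slice_tail l c cs hl]
      by_cases hcf : c = 'f'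
      · simp [hcf]
      · by_cases hct : c = 't'
        · simp [hct, ih]
        · by_cases hcn : c = 'n'
          · simp [hcn, ih]
          · simp [hcf, hct, hcn, ih]

-- before the f1 block has been seen, A's loop equals B's search (any state with fd ≠ "1")
lemma loopA_search (ls : List String) : ∀ fd ft fn, fd ≠ some "1" →
    pvLoopA ls fd ft fn = pvFindB (ls.filter (fun l => l ≠ "")) := by
  induction ls with
  | nil => intro fd ft fn hfd; simp [pvLoopA, pvFindB, hfd]
  | cons l rest ih =>
    intro fd ft fn hfd
    match hl : l.toList with
    | [] =>
      have hle : l = "" := String.toList_eq_nil_iff.mp hl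
      simp [pvLoopA, hle, ih _ _ _ hfd]
    | c :: cs =>
      have hlne : l ≠ "" := by
        intro h; rw [h] at hl; simp [String.toList] at hl
      have hfil : (l :: rest).filter (fun l => l ≠ "") = l :: rest.filter (fun l => l ≠ "") := by
        simp [hlne]
      rw [hfil]
      simp only [pvLoopA, hl, pvFindB]
      by_cases hcf : c = 'f'
      · by_cases hv : String.ofList cs = "1"
        · have hcs : cs = ['1'] := by
            have h := congrArg String.toList hv
            simpa using h
          have hlf1 : l = "f1" := by
            apply String.toList_inj.mp
            rw [hl, hcs, hcf]; decide
          simp [hcf, hfd, hv, hlf1, loopA_one]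
        · have hlf1 : l ≠ "f1" := by
            intro h; rw [h] at hl
            have : c :: cs = ['f', '1'] := by rw [← hl]; decide
            apply hv
            apply String.toList_inj.mp
            simp [(List.cons.injEq .. ▸ this).2]
          simp only [hcf, if_true, hfd, if_false]
          rw [ih _ _ _ (by simp [hv])]
          simp [hlf1]
      · have hlf1 : l ≠ "f1" := by
          intro h; rw [h] at hl
          have : c :: cs = ['f', '1'] := by rw [← hl]; decide
          exact hcf (List.cons.injEq .. ▸ this).1
        simp [hcf, hfd, hlf1, ih _ _ _ hfd]

-- ===== VERDICT (by name: the statement is the Claim_ definition above) =====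
theorem parse_lsof_fd1_py_spec : Claim_equal_parse_lsof_fd1_py := by
  intro stdout _
  unfold Spec_parse_lsof_fd1_py parse_lsof_fd1_py parse_lsof_fd1_py_alt
  exact loopA_search _ _ _ _ (by simp)
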